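-- pv_equiv track=rewrite | github.com/lyonva/Nue | analysis/combo-three/hv.py | worst
-- ===== SOURCE A (Python) =====
-- def worst(pts):
--     d = len(pts[0])
--     n = len(pts)
--     x = [ pts[0][i] for i in range(d) ]
--     for i in range(n):
--         for j in range(d):
--             x[j] = min(x[j], pts[i][j])
--     return x
-- ===== SOURCE B (Python) =====
-- def worst(pts):
--     d = len(pts[0])
--
--     def merge(u, v):
--         return [min(a, b) for a, b in zip(u, v)]
--
--     def go(lo, hi):
--         if hi <= lo + 1:
--             return pts[lo][:d]
--         mid = (lo + hi) // 2
--         return merge(go(lo, mid), go(mid, hi))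
--
--     return go(0, len(pts))
-- ===== Notes on version B (the rewrite author's own statement) =====
-- stated objective: alternative
-- what changed: Replaces A's row-major running-minimum accumulator (nested index loops updating x in place) by a divide-and-conquer recursion: split the row range in halves, recurse, and merge the two partial minimum vectors elementwise; correct because min is associative and commutative.
import Mathlib
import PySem

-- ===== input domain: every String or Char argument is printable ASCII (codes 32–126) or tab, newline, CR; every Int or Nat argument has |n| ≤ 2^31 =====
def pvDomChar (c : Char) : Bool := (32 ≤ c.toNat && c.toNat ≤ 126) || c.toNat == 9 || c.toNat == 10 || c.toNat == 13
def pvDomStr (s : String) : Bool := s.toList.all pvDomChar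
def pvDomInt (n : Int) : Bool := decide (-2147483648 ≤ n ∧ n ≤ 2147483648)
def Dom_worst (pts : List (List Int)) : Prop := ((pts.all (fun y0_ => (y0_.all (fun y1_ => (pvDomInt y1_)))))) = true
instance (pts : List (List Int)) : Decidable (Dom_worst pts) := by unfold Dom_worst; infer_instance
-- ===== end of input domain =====

-- B computes the per-dimension minima by divide and conquer on the row range (merge two
-- partial minimum vectors elementwise) instead of A's running accumulator over nested loops.

-- ===== PORT A =====
def worst (pts : List (List Int)) : List Int :=
  let d : Int := (PySem.List.pyGetD pts 0 []).length
  let n : Int := pts.length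
  let x := (PySem.List.pyRange 0 d 1).map (fun i => PySem.List.pyGetD (PySem.List.pyGetD pts 0 []) i 0)
  (PySem.List.pyRange 0 n 1).foldl (fun x i =>
    (PySem.List.pyRange 0 d 1).foldl (fun x j =>
      PySem.List.pySetD x j
        (min (PySem.List.pyGetD x j 0)
             (PySem.List.pyGetD (PySem.List.pyGetD pts i []) j 0))) x) x

-- ===== PORT B =====
-- merge(u, v) = [min(a, b) for a, b in zip(u, v)]
def worstMerge (u v : List Int) : List Int := (u.zip v).map (fun p => min p.1 p.2)

-- go(lo, hi): base case a single row truncated to d, else recurse on halves and merge.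
def worstGo (pts : List (List Int)) (d : Nat) (lo hi : Nat) : List Int :=
  if hi ≤ lo + 1 then (pts.getD lo []).take d
  else
    worstMerge (worstGo pts d lo ((lo + hi) / 2)) (worstGo pts d ((lo + hi) / 2) hi)
termination_by hi - lo
decreasing_by all_goals omega

def worst_alt (pts : List (List Int)) : List Int :=
  let d := (PySem.List.pyGetD pts 0 []).length
  worstGo pts d 0 pts.length

-- ===== PRECONDITION & SPEC =====
-- Pre_ excludes exactly the inputs on which A raises IndexError: empty pts, and ragged
-- inputs where some row is shorter than pts[0].
def Pre_worst (pts : List (List Int)) : Prop :=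
  pts ≠ [] ∧ ∀ r ∈ pts, (pts.headD []).length ≤ r.length
instance (pts : List (List Int)) : Decidable (Pre_worst pts) := by unfold Pre_worst; infer_instance

def pvWitness_worst : List (List Int) := [[1, 2], [3, 0]]

def Spec_worst (pts : List (List Int)) (out : List Int) : Prop := out = worst_alt pts
instance (pts : List (List Int)) (out : List Int) : Decidable (Spec_worst pts out) := by unfold Spec_worst; infer_instance

-- ===== CLAIM (what is proved, stated in full; the proofs are below) =====
def Claim_equal_worst : Prop := ∀ (pts : List (List Int)), Dom_worst pts → Pre_worst pts → Spec_worst pts (worst pts)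

-- ===== LEMMAS AND PROOFS =====

-- ---- A-side characterisation (running accumulator = column folds) ----

theorem getD_set_int (l : List Int) (i : Nat) (v : Int) (k : Nat) :
    (l.set i v).getD k 0 = if k = i ∧ i < l.length then v else l.getD k 0 := by
  simp only [List.getD, List.getElem?_set]
  split_ifs with h1 h2 h3 h4 <;> simp_all

theorem inner_spec (row : List Int) :
    ∀ (d : Nat) (x : List Int), d ≤ x.length →
    (((PySem.List.pyRange 0 (d : Int) 1).foldl (fun x j =>
        PySem.List.pySetD x j
          (min (PySem.List.pyGetD x j 0) (PySem.List.pyGetD row j 0))) x).length = x.length ∧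
     ∀ k : Nat, ((PySem.List.pyRange 0 (d : Int) 1).foldl (fun x j =>
        PySem.List.pySetD x j
          (min (PySem.List.pyGetD x j 0) (PySem.List.pyGetD row j 0))) x).getD k 0 =
        if k < d then min (x.getD k 0) (row.getD k 0) else x.getD k 0) := by
  intro d
  induction d with
  | zero =>
    intro x _
    rw [PySem.List.pyRange_one_eq_nil (by omega)]
    simp
  | succ d ih =>
    intro x hx
    have hcast : ((d + 1 : Nat) : Int) = (d : Int) + 1 := by push_cast; ring
    rw [hcast, PySem.List.pyRange_one_succ_right (by positivity), List.foldl_append]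
    obtain ⟨hlen, hget⟩ := ih x (by omega)
    simp only [List.foldl_cons, List.foldl_nil]
    rw [PySem.List.pySetD_natCast, PySem.List.pyGetD_natCast, PySem.List.pyGetD_natCast]
    constructor
    · rw [List.length_set, hlen]
    · intro k
      rw [getD_set_int, hget d, hget k]
      simp only [Nat.lt_irrefl, if_false]
      split_ifs <;> simp_all <;> omega

theorem outer_spec (d : Nat) :
    ∀ (rows : List (List Int)) (x : List Int), x.length = d → (∀ r ∈ rows, d ≤ r.length) →
    ((rows.foldl (fun x row =>
        (PySem.List.pyRange 0 (d : Int) 1).foldl (fun x j =>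
          PySem.List.pySetD x j
            (min (PySem.List.pyGetD x j 0) (PySem.List.pyGetD row j 0))) x) x).length = d ∧
     ∀ k : Nat, k < d →
       (rows.foldl (fun x row =>
          (PySem.List.pyRange 0 (d : Int) 1).foldl (fun x j =>
            PySem.List.pySetD x j
              (min (PySem.List.pyGetD x j 0) (PySem.List.pyGetD row j 0))) x) x).getD k 0 =
         rows.foldl (fun a r => min a (r.getD k 0)) (x.getD k 0)) := by
  intro rows
  induction rows with
  | nil => intro x hx _; exact ⟨hx, fun k _ => rfl⟩
  | cons row rows ih =>
    intro x hx hr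
    obtain ⟨hlen, hget⟩ := inner_spec row d x (by omega)
    simp only [List.foldl_cons]
    obtain ⟨hlen', hget'⟩ := ih ((PySem.List.pyRange 0 (d : Int) 1).foldl (fun x j =>
        PySem.List.pySetD x j
          (min (PySem.List.pyGetD x j 0) (PySem.List.pyGetD row j 0))) x)
      (by omega) (fun r h => hr r (List.mem_cons_of_mem _ h))
    refine ⟨hlen', fun k hk => ?_⟩
    rw [hget' k hk, hget k, if_pos hk]

theorem worst_A_eq (p0 : List Int) (rest : List (List Int))
    (hlen : ∀ r ∈ p0 :: rest, p0.length ≤ r.length) :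
    worst (p0 :: rest) =
      (List.range p0.length).map (fun k =>
        rest.foldl (fun a r => min a (r.getD k 0)) (p0.getD k 0)) := by
  have h0 : PySem.List.pyGetD (p0 :: rest) (0 : Int) ([] : List Int) = p0 := by simp
  unfold worst
  simp only [h0]
  rw [PySem.List.map_pyGetD_pyRange_zero']
  rw [PySem.List.foldl_pyRange_zero_pyGetD' (p0 :: rest) ([] : List Int)
      (fun x row => (PySem.List.pyRange 0 ((p0.length : Nat) : Int) 1).foldl (fun x j =>
        PySem.List.pySetD x j
          (min (PySem.List.pyGetD x j 0) (PySem.List.pyGetD row j 0))) x) p0]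
  obtain ⟨hL, hG⟩ := outer_spec p0.length (p0 :: rest) p0 rfl hlen
  apply List.ext_getElem
  · simpa using hL
  · intro k h1 h2
    have hk : k < p0.length := by rw [hL] at h1; exact h1
    rw [← List.getD_eq_getElem _ 0 h1, hG k hk]
    simp [List.foldl_cons, min_self]

-- ---- B-side characterisation (divide and conquer = column folds) ----

theorem merge_map_range (d : Nat) (f g : Nat → Int) :
    worstMerge ((List.range d).map f) ((List.range d).map g)
      = (List.range d).map (fun k => min (f k) (g k)) := by
  unfold worstMerge
  rw [List.zip_map', List.map_map]
  rfl

theorem take_eq_map_range (r : List Int) (d : Nat) (h : d ≤ r.length) :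
    r.take d = (List.range d).map (fun k => r.getD k 0) := by
  apply List.ext_getElem
  · simp [h]
  · intro k h1 h2
    simp at h1
    simp [List.getElem?_eq_getElem (by omega : k < r.length)]

theorem foldl_min_shift (k : Nat) (u : List (List Int)) (a b : Int) :
    u.foldl (fun x r => min x (r.getD k 0)) (min a b)
      = min a (u.foldl (fun x r => min x (r.getD k 0)) b) := by
  induction u generalizing b with
  | nil => rfl
  | cons r t ih => simp only [List.foldl_cons, min_assoc, ih]

theorem seg_split (pts : List (List Int)) (lo mid hi : Nat) (h1 : lo ≤ mid) (h2 : mid ≤ hi) :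
    (pts.drop lo).take (hi - lo)
      = (pts.drop lo).take (mid - lo) ++ (pts.drop mid).take (hi - mid) := by
  have e : pts.drop mid = (pts.drop lo).drop (mid - lo) := by
    rw [List.drop_drop]; congr 1; omega
  have h3 : hi - lo = (mid - lo) + (hi - mid) := by omega
  rw [h3, List.take_add, e]

theorem go_spec (pts : List (List Int)) (d : Nat) (hd : ∀ r ∈ pts, d ≤ r.length) :
    ∀ (m lo hi : Nat), hi - lo ≤ m → lo < hi → hi ≤ pts.length →
    ∀ (s : List Int) (t : List (List Int)), (pts.drop lo).take (hi - lo) = s :: t →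
    worstGo pts d lo hi
      = (List.range d).map (fun k => t.foldl (fun a r => min a (r.getD k 0)) (s.getD k 0)) := by
  intro m
  induction m with
  | zero => intro lo hi h _ _ _ _ _; omega
  | succ m ih =>
    intro lo hi hm hlh hhi s t hseg
    by_cases hbase : hi ≤ lo + 1
    · -- single row: segment is [pts[lo]]
      have hone : hi - lo = 1 := by omega
      rw [hone] at hseg
      have hlo : lo < pts.length := by omega
      have hs : s = pts[lo] ∧ t = [] := by
        have : (pts.drop lo).take 1 = [pts[lo]] := by
          rw [List.take_one, List.head?_drop]
          simp [List.getElem?_eq_getElem hlo]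
        rw [this] at hseg
        exact ⟨(List.cons.injEq _ _ _ _ ▸ hseg).1.symm, ((List.cons.injEq _ _ _ _ ▸ hseg).2).symm⟩
      obtain ⟨hs1, hs2⟩ := hs
      rw [worstGo, if_pos hbase, hs1, hs2]
      have hget : pts.getD lo [] = pts[lo] := List.getD_eq_getElem pts [] hlo
      rw [hget, take_eq_map_range _ _ (hd _ (List.getElem_mem hlo))]
      simp
    · -- split at mid
      have h2 : lo + 2 ≤ hi := by omega
      set mid := (lo + hi) / 2 with hmid
      have hm1 : lo < mid := by omega
      have hm2 : mid < hi := by omega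
      have hsplit := seg_split pts lo mid hi (by omega) (by omega)
      -- left segment nonempty
      have hlenL : ((pts.drop lo).take (mid - lo)).length = mid - lo := by
        simp; omega
      have hlenR : ((pts.drop mid).take (hi - mid)).length = hi - mid := by
        simp; omega
      obtain ⟨sL, tL, hL⟩ : ∃ sL tL, (pts.drop lo).take (mid - lo) = sL :: tL := by
        cases h : (pts.drop lo).take (mid - lo) with
        | nil => rw [h] at hlenL; simp at hlenL; omega
        | cons a b => exact ⟨a, b, rfl⟩
      obtain ⟨sR, tR, hR⟩ : ∃ sR tR, (pts.drop mid).take (hi - mid) = sR :: tR := by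
        cases h : (pts.drop mid).take (hi - mid) with
        | nil => rw [h] at hlenR; simp at hlenR; omega
        | cons a b => exact ⟨a, b, rfl⟩
      have ihL := ih lo mid (by omega) hm1 (by omega) sL tL hL
      have ihR := ih mid hi (by omega) hm2 hhi sR tR hR
      rw [worstGo, if_neg hbase, ← hmid, ihL, ihR, merge_map_range]
      -- identify s, t from the split
      rw [hL, hR] at hsplit
      rw [hseg] at hsplit
      have hs : s = sL ∧ t = tL ++ sR :: tR := by
        simpa using hsplit
      obtain ⟨hs1, hs2⟩ := hs
      rw [hs1, hs2]
      apply List.map_congr_left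
      intro k _
      rw [List.foldl_append]
      simp only [List.foldl_cons]
      rw [foldl_min_shift]

theorem worst_alt_eq (p0 : List Int) (rest : List (List Int))
    (hlen : ∀ r ∈ p0 :: rest, p0.length ≤ r.length) :
    worst_alt (p0 :: rest) =
      (List.range p0.length).map (fun k =>
        rest.foldl (fun a r => min a (r.getD k 0)) (p0.getD k 0)) := by
  unfold worst_alt
  have h0 : PySem.List.pyGetD (p0 :: rest) (0 : Int) ([] : List Int) = p0 := by simp
  simp only [h0]
  exact go_spec (p0 :: rest) p0.length hlen (p0 :: rest).length 0 (p0 :: rest).length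
    (by omega) (by simp) (le_refl _) p0 rest (by simp)

-- ===== VERDICT (by name: the statement is the Claim_ definition above) =====
theorem worst_spec : Claim_equal_worst := by
  intro pts _ hpre
  obtain ⟨hne, hlen⟩ := hpre
  cases pts with
  | nil => exact absurd rfl hne
  | cons p0 rest =>
    simp only [List.headD_cons] at hlen
    unfold Spec_worst
    rw [worst_A_eq p0 rest hlen, worst_alt_eq p0 rest hlen]
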